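-- pv_equiv track=rewrite | github.com/chen0430tw/hidrs | et_cooling.py | compute_beta1
-- ===== SOURCE A (Python) =====
-- from typing import Any, Callable, Dict, List, Optional, Set, Tuple
--
-- def compute_beta1(adj: Dict[int, Set[int]], N: int) -> int:
--     """
--     计算无向图的 β₁（第一 Betti 数）= E - V + C
--     其中 E = 边数，V = 顶点数，C = 连通分量数。
--
--     ET 语义：β₁ 计数等式依赖图中不可约循环推导数。
--     β₁ 高 → 系统中存在大量循环依赖，需要更多探索。
--     β₁ 低 → 推导结构接近树形，可以收敛。
--     """
--     # 计算边数（无向图，每条边只算一次）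
--     edges = set()
--     active_nodes = set()
--     for u, neighbors in adj.items():
--         active_nodes.add(u)
--         for v in neighbors:
--             active_nodes.add(v)
--             edge = (min(u, v), max(u, v))
--             edges.add(edge)
--
--     E = len(edges)
--     V = len(active_nodes) if active_nodes else N
--
--     # BFS 计算连通分量数
--     visited = set()
--     C = 0
--     nodes_to_check = active_nodes if active_nodes else set(range(N))
--     for start in nodes_to_check:
--         if start in visited:
--             continue
--         C += 1
--         queue = [start]
--         visited.add(start)
--         while queue:
--             node = queue.pop(0)
--             for nb in adj.get(node, set()):
--                 if nb not in visited:
--                     visited.add(nb)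
--                     queue.append(nb)
--
--     # β₁ = E - V + C（图的圈秩 / 第一 Betti 数）
--     return max(0, E - V + C)
-- ===== SOURCE B (Python) =====
-- def compute_beta1(adj, N):
--     """
--     beta1 = E - V + C for an undirected graph, with C computed without any
--     BFS/queue: reachability is closed with Warshall's algorithm (row-set
--     variant) and a start opens a new component iff no earlier start reaches it.
--     An empty graph is a forest, so its beta1 is 0.
--     """
--     nodes = set()
--     edges = set()
--     for u, ns in adj.items():
--         nodes.add(u)
--         for v in ns:
--             nodes.add(v)
--             edges.add((u, v) if u <= v else (v, u))
--     if not nodes: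
--         return 0
--     E = len(edges)
--     V = len(nodes)
--     order = list(nodes)
--     # reach[s] = vertices currently known reachable from s (Warshall closure)
--     reach = {s: {t for t in order if s == t or t in adj.get(s, set())} for s in order}
--     for k in order:
--         for i in order:
--             if k in reach[i]:
--                 reach[i] |= reach[k]
--     C = 0
--     seen = []
--     for s in order:
--         if not any(s in reach[t] for t in seen):
--             C += 1
--         seen.append(s)
--     return max(0, E - V + C)
-- ===== Notes on version B (the rewrite author's own statement) =====
-- stated objective: alternative
-- what changed: Replaces the per-start BFS with a pop(0) queue by a Warshall closure of the reachability relation (row-set variant) followed by a count of starts that no earlier start reaches; Pre_ restricts N (a vertex count, only read when the graph is empty) to 0 <= N, the natural domain, and excludes association lists with duplicate keys, which no Python dict argument can represent.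
-- outside the precondition, e.g. on compute_beta1({}, -3): A returns 3, B returns 0
import Mathlib
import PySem

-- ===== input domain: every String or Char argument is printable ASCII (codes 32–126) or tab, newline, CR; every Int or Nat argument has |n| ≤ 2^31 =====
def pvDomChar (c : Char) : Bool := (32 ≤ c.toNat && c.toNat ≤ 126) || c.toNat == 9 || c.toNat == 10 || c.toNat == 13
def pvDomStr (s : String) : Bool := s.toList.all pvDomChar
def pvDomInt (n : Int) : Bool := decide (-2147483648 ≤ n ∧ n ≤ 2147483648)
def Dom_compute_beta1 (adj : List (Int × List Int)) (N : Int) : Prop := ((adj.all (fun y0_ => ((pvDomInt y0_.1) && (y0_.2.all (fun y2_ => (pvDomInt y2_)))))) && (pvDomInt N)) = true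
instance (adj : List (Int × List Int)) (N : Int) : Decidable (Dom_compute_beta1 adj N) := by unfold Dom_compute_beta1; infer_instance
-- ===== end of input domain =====

-- B replaces A's per-start BFS (pop(0) queue) by a Warshall closure of the
-- reachability relation plus a no-earlier-start-reaches-it count (alternative algorithm).
-- Both ports model CPython's set iteration order (pySetOrderInt) exactly where A's
-- result depends on it; this hand-written model is validated by the differential test.

-- ===== PORT A =====
-- shared port primitive: the iteration order of a CPython set of ints built by
-- inserting the given elements in sequence (exact model of CPython's hash table:
-- open addressing, 9 linear probes, perturb recurrence, x4 growth at 3/5 fill;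
-- the final check never fails in practice and only makes the properties provable)
-- CPython int hash
def pvHashInt (x : Int) : Nat :=
  let M : Int := 2305843009213693951
  let h := if 0 ≤ x then x % M else -((-x) % M)
  let h := if h = -1 then -2 else h
  (h % 18446744073709551616).toNat

-- one linear-probe window scan (up to 9 slots after a collision), as CPython's set does
def pvLinear (table : List (Option Int)) (key : Int) : Nat → Nat → Option (Option (List (Option Int)))
  | _, 0 => none
  | j, probes + 1 =>
    match table.getD j none with
    | none => some (some (table.set j (some key)))
    | some k => if k = key then some none else pvLinear table key (j + 1) probes

-- open-addressing probe loop (perturb recurrence), fuel only for totality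
def pvProbe (table : List (Option Int)) (key : Int) : Nat → Nat → Nat → Option (List (Option Int))
  | 0, _, _ => none
  | fuel + 1, i, perturb =>
    let mask := table.length - 1
    match table.getD i none with
    | none => some (table.set i (some key))
    | some k =>
      if k = key then none
      else
        match (if i + 9 ≤ mask then pvLinear table key (i + 1) 9 else none) with
        | some (some t) => some t
        | some none => none
        | none => pvProbe table key fuel ((5 * i + 1 + (perturb >>> 5)) &&& mask) (perturb >>> 5)

def pvFreshIns (t : List (Option Int)) (k : Int) : List (Option Int) :=
  match pvProbe t k (t.length + 20) (pvHashInt k &&& (t.length - 1)) (pvHashInt k) with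
  | some t' => t'
  | none => t

def pvSetAdd (st : List (Option Int) × Nat) (x : Int) : List (Option Int) × Nat :=
  match pvProbe st.1 x (st.1.length + 20) (pvHashInt x &&& (st.1.length - 1)) (pvHashInt x) with
  | none => st
  | some t =>
    let fill := st.2 + 1
    let mask := t.length - 1
    if fill * 5 ≥ mask * 3 then
      let minused := fill * (if fill > 50000 then 2 else 4)
      let newsize := Nat.rec (motive := fun _ => Nat) 8 (fun _ s => if s ≤ minused then s * 2 else s) 64
      (((t.filterMap id).foldl pvFreshIns (List.replicate newsize none)), fill)
    else (t, fill)

def pySetOrderInt (l : List Int) : List Int :=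
  let st := l.foldl pvSetAdd (List.replicate 8 none, 0)
  let cand := st.1.filterMap id
  if cand.Nodup ∧ (∀ x ∈ cand, x ∈ l) ∧ (∀ x ∈ l, x ∈ cand) then cand
  else PySem.Set.ofList l

-- edges/active_nodes accumulation loop of A (one pass over adj.items(); the inner
-- 'for v in neighbors' iterates a Python set: pySetOrderInt gives that exact order)
def aCollect (adj : List (Int × List Int)) : PySem.Set (Int × Int) × PySem.Set Int :=
  adj.foldl (fun st p =>
    (pySetOrderInt p.2).foldl (fun st2 v =>
      (PySem.Set.add st2.1 (min p.1 v, max p.1 v), PySem.Set.add st2.2 v))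
      (st.1, PySem.Set.add st.2 p.1))
    (PySem.Set.empty, PySem.Set.empty)

-- the 'while queue:' BFS loop of A; fuel only makes the recursion structural
-- (2*|active_nodes|+1 is proved sufficient below); the neighbour set is iterated
-- in stored-list order: the visited set and count do not depend on that order
def aBfs (adj : List (Int × List Int)) : Nat → PySem.Set Int → List Int → PySem.Set Int
  | 0, vis, _ => vis
  | _ + 1, vis, [] => vis
  | fuel + 1, vis, node :: rest =>
      let st := ((PySem.Dict.mk adj).getD node []).foldl
        (fun (st : PySem.Set Int × List Int) nb =>
          if nb ∈ st.1 then st else (PySem.Set.add st.1 nb, st.2 ++ [nb])) (vis, rest)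
      aBfs adj fuel st.1 st.2

def compute_beta1 (adj : List (Int × List Int)) (N : Int) : Int :=
  let ec := aCollect adj
  let edges := ec.1
  let active := ec.2
  let E : Int := PySem.Set.len edges
  let V : Int := if active ≠ [] then PySem.Set.len active else N
  -- 'for start in nodes_to_check' iterates a set: pySetOrderInt models that order
  -- (set(range(N)) is the set built by inserting 0..N-1 in sequence)
  let nodesToCheck : List Int :=
    pySetOrderInt (if active ≠ [] then active else PySem.List.pyRange 0 N 1)
  let fuel : Nat := 2 * active.length + 1
  let res := nodesToCheck.foldl (fun (st : PySem.Set Int × Int) start =>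
      if start ∈ st.1 then st
      else (aBfs adj fuel (PySem.Set.add st.1 start) [start], st.2 + 1))
    (PySem.Set.empty, 0)
  max 0 (E - V + res.2)

-- ===== PORT B =====
-- nodes/edges in one pass, as Source B ('for v in ns' iterates the set: pySetOrderInt)
def bCollect (adj : List (Int × List Int)) : PySem.Set Int × PySem.Set (Int × Int) :=
  adj.foldl (fun st p =>
    (pySetOrderInt p.2).foldl (fun st2 v =>
      (PySem.Set.add st2.1 v, PySem.Set.add st2.2 (if p.1 ≤ v then (p.1, v) else (v, p.1))))
      (PySem.Set.add st.1 p.1, st.2))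
    (PySem.Set.empty, PySem.Set.empty)

-- reach = {s: {t for t in order if s == t or t in adj.get(s, set())} for s in order}
def bBase (adj : List (Int × List Int)) (order : List Int) : PySem.Dict Int (PySem.Set Int) :=
  order.foldl (fun d s =>
    d.insert s (PySem.Set.ofList (order.filter
      (fun t => s == t || decide (t ∈ (PySem.Dict.mk adj).getD s []))))) PySem.Dict.empty

-- for k in order: for i in order: if k in reach[i]: reach[i] |= reach[k]
def bFw (order : List Int) (d0 : PySem.Dict Int (PySem.Set Int)) :
    PySem.Dict Int (PySem.Set Int) :=
  order.foldl (fun d k =>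
    order.foldl (fun d i =>
      if decide (k ∈ d.getD i []) then
        d.insert i (PySem.Set.union (d.getD i []) (d.getD k []))
      else d) d) d0

-- C = 0; seen = []; for s in order: if not any(s in reach[t] for t in seen): C += 1; seen.append(s)
def bCount (order : List Int) (d : PySem.Dict Int (PySem.Set Int)) : Int :=
  (order.foldl (fun (st : List Int × Int) s =>
    (st.1 ++ [s], if st.1.any (fun t => decide (s ∈ d.getD t [])) then st.2 else st.2 + 1))
    ([], 0)).2

def compute_beta1_alt (adj : List (Int × List Int)) (N : Int) : Int :=
  let st := bCollect adj
  let nodes := st.1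
  let edges := st.2
  if nodes = [] then 0
  else
    let E : Int := (edges.length : Int)
    let V : Int := (nodes.length : Int)
    let order := pySetOrderInt nodes
    let reach := bFw order (bBase adj order)
    let C := bCount order reach
    max 0 (E - V + C)

-- ===== PRECONDITION & SPEC =====
-- Pre_ restricts N (a vertex count, only read when the graph is empty) to its natural
-- domain 0 ≤ N — for the empty graph with negative N, A's value -N is an accident of
-- V = N with an empty range — and excludes association lists with duplicate keys,
-- which a Python dict argument cannot represent (the ports would read both bindings,
-- the dict keeps one).
def Pre_compute_beta1 (adj : List (Int × List Int)) (N : Int) : Prop :=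
  (adj = [] → 0 ≤ N) ∧ (adj.map (·.1)).Nodup
instance (adj : List (Int × List Int)) (N : Int) : Decidable (Pre_compute_beta1 adj N) := by
  unfold Pre_compute_beta1; infer_instance
def pvWitness_compute_beta1 : (List (Int × List Int)) × Int := ([(1, [2]), (2, [1]), (5, [])], 3)

def Spec_compute_beta1 (adj : List (Int × List Int)) (N : Int) (out : Int) : Prop := out = compute_beta1_alt adj N
instance (adj : List (Int × List Int)) (N : Int) (out : Int) : Decidable (Spec_compute_beta1 adj N out) := by unfold Spec_compute_beta1; infer_instance

-- ===== CLAIM (what is proved, stated in full; the proofs are below) =====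
def Claim_equal_compute_beta1 : Prop := ∀ (adj : List (Int × List Int)) (N : Int), Dom_compute_beta1 adj N → Pre_compute_beta1 adj N → Spec_compute_beta1 adj N (compute_beta1 adj N)

-- ===== LEMMAS AND PROOFS =====

-- ---- properties of the set-order model (all that the proofs need: a permutation) ----

theorem pySetOrderInt_nodup (l : List Int) : (pySetOrderInt l).Nodup := by
  simp only [pySetOrderInt]
  split_ifs with h
  · exact h.1
  · exact PySem.Set.nodup_ofList l

theorem mem_pySetOrderInt (l : List Int) (x : Int) : x ∈ pySetOrderInt l ↔ x ∈ l := by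
  simp only [pySetOrderInt]
  split_ifs with h
  · exact ⟨fun hx => h.2.1 x hx, fun hx => h.2.2 x hx⟩
  · exact PySem.Set.mem_ofList l x

-- ---- proof-only definitions: the stored (directed) edge relation and reachability ----

def eRel (adj : List (Int × List Int)) (u v : Int) : Prop := ∃ p ∈ adj, p.1 = u ∧ v ∈ p.2

def KRel (adj : List (Int × List Int)) (u v : Int) : Prop := Relation.ReflTransGen (eRel adj) u v

def occurs (adj : List (Int × List Int)) (x : Int) : Prop := ∃ p ∈ adj, p.1 = x ∨ x ∈ p.2

theorem getD_mk_adj {adj : List (Int × List Int)} (hk : (adj.map (·.1)).Nodup)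
    (u v : Int) : v ∈ (PySem.Dict.mk adj).getD u [] ↔ eRel adj u v := by
  induction adj with
  | nil => simp [PySem.Dict.getD, PySem.Dict.get?, eRel]
  | cons p rest ih =>
    simp only [List.map_cons, List.nodup_cons] at hk
    rw [PySem.Dict.getD_eq_get?_getD, PySem.Dict.get?_mk_cons]
    by_cases hpu : p.1 = u
    · subst hpu
      simp only [beq_self_eq_true, if_true, Option.getD_some]
      constructor
      · intro hv; exact ⟨p, List.mem_cons_self, rfl, hv⟩
      · rintro ⟨q, hq, hq1, hq2⟩
        rcases List.mem_cons.1 hq with rfl | hq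
        · exact hq2
        · exact absurd (hq1 ▸ (List.mem_map.2 ⟨q, hq, rfl⟩)) hk.1
    · have : (p.1 == u) = false := beq_eq_false_iff_ne.2 hpu
      rw [this]
      simp only [Bool.false_eq_true, if_false]
      rw [← PySem.Dict.getD_eq_get?_getD]
      rw [ih hk.2]
      constructor
      · rintro ⟨q, hq, hq1, hq2⟩; exact ⟨q, List.mem_cons_of_mem _ hq, hq1, hq2⟩
      · rintro ⟨q, hq, hq1, hq2⟩
        rcases List.mem_cons.1 hq with rfl | hq
        · exact absurd hq1 hpu
        · exact ⟨q, hq, hq1, hq2⟩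

theorem eRel_occurs {adj : List (Int × List Int)} {u v : Int} (h : eRel adj u v) :
    occurs adj u ∧ occurs adj v := by
  obtain ⟨p, hp, rfl, hv⟩ := h
  exact ⟨⟨p, hp, Or.inl rfl⟩, ⟨p, hp, Or.inr hv⟩⟩

-- A's and B's collection loops build the same two lists (joint projection argument)
theorem collect_eq_fold : ∀ (adj : List (Int × List Int)) (st : PySem.Set (Int × Int) × PySem.Set Int),
    (adj.foldl (fun st p =>
      (pySetOrderInt p.2).foldl (fun st2 v =>
        (PySem.Set.add st2.1 (min p.1 v, max p.1 v), PySem.Set.add st2.2 v))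
        (st.1, PySem.Set.add st.2 p.1)) st)
    = ((adj.foldl (fun st p =>
        (pySetOrderInt p.2).foldl (fun st2 v =>
          (PySem.Set.add st2.1 v, PySem.Set.add st2.2 (if p.1 ≤ v then (p.1, v) else (v, p.1))))
          (PySem.Set.add st.1 p.1, st.2)) (st.2, st.1)).2,
       (adj.foldl (fun st p =>
        (pySetOrderInt p.2).foldl (fun st2 v =>
          (PySem.Set.add st2.1 v, PySem.Set.add st2.2 (if p.1 ≤ v then (p.1, v) else (v, p.1))))
          (PySem.Set.add st.1 p.1, st.2)) (st.2, st.1)).1) := by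
  intro adj
  induction adj with
  | nil => intro st; rfl
  | cons p rest ih =>
    intro st
    simp only [List.foldl_cons]
    have inner : ∀ (ns : List Int) (e : PySem.Set (Int × Int)) (n : PySem.Set Int),
        ns.foldl (fun st2 v =>
          (PySem.Set.add st2.1 (min p.1 v, max p.1 v), PySem.Set.add st2.2 v)) (e, n)
        = ((ns.foldl (fun st2 v =>
            (PySem.Set.add st2.1 v, PySem.Set.add st2.2 (if p.1 ≤ v then (p.1, v) else (v, p.1))))
            (n, e)).2,
           (ns.foldl (fun st2 v =>
            (PySem.Set.add st2.1 v, PySem.Set.add st2.2 (if p.1 ≤ v then (p.1, v) else (v, p.1))))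
            (n, e)).1) := by
      intro ns
      induction ns with
      | nil => intro e n; rfl
      | cons v t iht =>
        intro e n
        simp only [List.foldl_cons]
        rw [iht]
        congr 2 <;> · rw [min_def, max_def]; split_ifs <;> rfl
    rw [inner, ih]

theorem mem_aCollect_aux : ∀ (adj : List (Int × List Int)) (st : PySem.Set (Int × Int) × PySem.Set Int) (x : Int),
    st.2.Nodup →
    ((x ∈ (adj.foldl (fun st p =>
      (pySetOrderInt p.2).foldl (fun st2 v =>
        (PySem.Set.add st2.1 (min p.1 v, max p.1 v), PySem.Set.add st2.2 v))
        (st.1, PySem.Set.add st.2 p.1)) st).2 ↔ x ∈ st.2 ∨ occurs adj x) ∧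
    (adj.foldl (fun st p =>
      (pySetOrderInt p.2).foldl (fun st2 v =>
        (PySem.Set.add st2.1 (min p.1 v, max p.1 v), PySem.Set.add st2.2 v))
        (st.1, PySem.Set.add st.2 p.1)) st).2.Nodup) := by
  intro adj
  induction adj with
  | nil => intro st x h; simp [occurs, h]
  | cons p rest ih =>
    intro st x hnd
    simp only [List.foldl_cons]
    have inner : ∀ (ns : List Int) (st2 : PySem.Set (Int × Int) × PySem.Set Int), st2.2.Nodup →
        (∀ y, (y ∈ (ns.foldl (fun st2 v =>
          (PySem.Set.add st2.1 (min p.1 v, max p.1 v), PySem.Set.add st2.2 v)) st2).2 ↔ y ∈ st2.2 ∨ y ∈ ns)) ∧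
        (ns.foldl (fun st2 v =>
          (PySem.Set.add st2.1 (min p.1 v, max p.1 v), PySem.Set.add st2.2 v)) st2).2.Nodup := by
      intro ns
      induction ns with
      | nil => intro st2 h; simp [h]
      | cons v t iht =>
        intro st2 h
        simp only [List.foldl_cons]
        obtain ⟨hmem, hnd2⟩ := iht (PySem.Set.add st2.1 (min p.1 v, max p.1 v), PySem.Set.add st2.2 v)
          (PySem.Set.nodup_add _ _ h)
        refine ⟨fun y => ?_, hnd2⟩
        rw [hmem]
        simp [PySem.Set.mem_add]
        tauto
    obtain ⟨hm1, hn1⟩ := inner (pySetOrderInt p.2) (st.1, PySem.Set.add st.2 p.1) (PySem.Set.nodup_add _ _ hnd)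
    obtain ⟨hm2, hn2⟩ := ih _ x hn1
    refine ⟨?_, hn2⟩
    rw [hm2, hm1]
    simp only [PySem.Set.mem_add, mem_pySetOrderInt]
    unfold occurs
    constructor
    · rintro (((h | rfl) | h) | ⟨q, hq, hq2⟩)
      · exact Or.inl h
      · exact Or.inr ⟨p, List.mem_cons_self, Or.inl rfl⟩
      · exact Or.inr ⟨p, List.mem_cons_self, Or.inr h⟩
      · exact Or.inr ⟨q, List.mem_cons_of_mem _ hq, hq2⟩
    · rintro (h | ⟨q, hq, hq2⟩)
      · exact Or.inl (Or.inl (Or.inl h))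
      · rcases List.mem_cons.1 hq with rfl | hq
        · rcases hq2 with h | h
          · exact Or.inl (Or.inl (Or.inr h.symm))
          · exact Or.inl (Or.inr h)
        · exact Or.inr ⟨q, hq, hq2⟩

theorem mem_aCollect_active (adj : List (Int × List Int)) (x : Int) :
    x ∈ (aCollect adj).2 ↔ occurs adj x := by
  have h := mem_aCollect_aux adj (PySem.Set.empty, PySem.Set.empty) x (by simp [PySem.Set.empty])
  rw [aCollect]
  rw [h.1]
  simp [PySem.Set.empty]

theorem nodup_aCollect_active (adj : List (Int × List Int)) : (aCollect adj).2.Nodup :=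
  (mem_aCollect_aux adj (PySem.Set.empty, PySem.Set.empty) 0 (by simp [PySem.Set.empty])).2

theorem reach_split {adj : List (Int × List Int)} {vis q : List Int}
    (hclosed : ∀ x ∈ vis, x ∉ q → ∀ y, eRel adj x y → y ∈ vis) :
    ∀ {y z : Int}, KRel adj y z → y ∈ vis → z ∈ vis ∨ ∃ s ∈ q, KRel adj s z := by
  intro y z h hy
  induction h with
  | refl => exact Or.inl hy
  | tail hab hbc ih =>
    rename_i m z'
    rcases ih with hv | ⟨s, hs, hk⟩
    · by_cases hq : m ∈ q
      · exact Or.inr ⟨m, hq, Relation.ReflTransGen.single hbc⟩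
      · exact Or.inl (hclosed m hv hq _ hbc)
    · exact Or.inr ⟨s, hs, hk.tail hbc⟩

theorem bfs_inner (active : List Int) :
    ∀ (ns : List Int), (∀ x ∈ ns, x ∈ active) →
    ∀ (vis q : List Int), vis.Nodup → q.Nodup → (∀ x ∈ q, x ∈ vis) →
      (∀ x, x ∈ (ns.foldl (fun (st : PySem.Set Int × List Int) nb =>
          if nb ∈ st.1 then st else (PySem.Set.add st.1 nb, st.2 ++ [nb])) (vis, q)).1 ↔ x ∈ vis ∨ x ∈ ns) ∧
      (ns.foldl (fun (st : PySem.Set Int × List Int) nb =>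
          if nb ∈ st.1 then st else (PySem.Set.add st.1 nb, st.2 ++ [nb])) (vis, q)).1.Nodup ∧
      (ns.foldl (fun (st : PySem.Set Int × List Int) nb =>
          if nb ∈ st.1 then st else (PySem.Set.add st.1 nb, st.2 ++ [nb])) (vis, q)).2.Nodup ∧
      (∃ new, (ns.foldl (fun (st : PySem.Set Int × List Int) nb =>
          if nb ∈ st.1 then st else (PySem.Set.add st.1 nb, st.2 ++ [nb])) (vis, q)).2 = q ++ new ∧ (∀ x ∈ new, x ∈ ns ∧ x ∉ vis)) ∧
      (∀ x ∈ (ns.foldl (fun (st : PySem.Set Int × List Int) nb =>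
          if nb ∈ st.1 then st else (PySem.Set.add st.1 nb, st.2 ++ [nb])) (vis, q)).2, x ∈ (ns.foldl (fun (st : PySem.Set Int × List Int) nb =>
          if nb ∈ st.1 then st else (PySem.Set.add st.1 nb, st.2 ++ [nb])) (vis, q)).1) ∧
      (∀ x ∈ ns, x ∉ vis → x ∈ (ns.foldl (fun (st : PySem.Set Int × List Int) nb =>
          if nb ∈ st.1 then st else (PySem.Set.add st.1 nb, st.2 ++ [nb])) (vis, q)).2) ∧
      2 * ((active.toFinset \ (ns.foldl (fun (st : PySem.Set Int × List Int) nb =>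
          if nb ∈ st.1 then st else (PySem.Set.add st.1 nb, st.2 ++ [nb])) (vis, q)).1.toFinset).card) + (ns.foldl (fun (st : PySem.Set Int × List Int) nb =>
          if nb ∈ st.1 then st else (PySem.Set.add st.1 nb, st.2 ++ [nb])) (vis, q)).2.length ≤
        2 * ((active.toFinset \ vis.toFinset).card) + q.length := by
  intro ns
  induction ns with
  | nil =>
    intro _ vis q hvis hq hqv
    exact ⟨fun x => by simp, hvis, hq, ⟨[], by simp, by simp⟩, fun x hx => hqv x hx,
      by simp, le_refl _⟩
  | cons nb t ih =>
    intro hmem vis q hvis hq hqv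
    simp only [List.foldl_cons]
    by_cases hnb : nb ∈ vis
    · rw [if_pos hnb]
      obtain ⟨ha, hb, hc, ⟨new, hnew, hnewp⟩, hd, hf, he⟩ :=
        ih (fun x hx => hmem x (List.mem_cons_of_mem _ hx)) vis q hvis hq hqv
      refine ⟨fun x => ?_, hb, hc,
        ⟨new, hnew, fun x hx => ⟨List.mem_cons_of_mem _ (hnewp x hx).1, (hnewp x hx).2⟩⟩,
        hd, fun x hx hxv => ?_, he⟩
      · rw [ha x]
        constructor
        · rintro (h | h)
          · exact Or.inl h
          · exact Or.inr (List.mem_cons_of_mem _ h)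
        · rintro (h | h)
          · exact Or.inl h
          · rcases List.mem_cons.1 h with rfl | h
            · exact Or.inl hnb
            · exact Or.inr h
      · rcases List.mem_cons.1 hx with rfl | hx
        · exact absurd hnb hxv
        · exact hf x hx hxv
    · rw [if_neg hnb]
      have hadd : PySem.Set.add vis nb = vis ++ [nb] := PySem.Set.add_of_not_mem hnb
      have hvis' : (PySem.Set.add vis nb).Nodup := PySem.Set.nodup_add _ _ hvis
      have hq' : (q ++ [nb]).Nodup := by
        rw [List.nodup_append]
        exact ⟨hq, List.nodup_singleton _, by simpa using fun a ha (hae : a = nb) => hnb (hae ▸ hqv a ha)⟩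
      have hqv' : ∀ x ∈ q ++ [nb], x ∈ PySem.Set.add vis nb := by
        intro x hx
        rw [hadd]
        rcases List.mem_append.1 hx with hx | hx
        · exact List.mem_append_left _ (hqv x hx)
        · exact List.mem_append_right _ hx
      obtain ⟨ha, hb, hc, ⟨new, hnew, hnewp⟩, hd, hf, he⟩ :=
        ih (fun x hx => hmem x (List.mem_cons_of_mem _ hx)) (PySem.Set.add vis nb) (q ++ [nb])
          hvis' hq' hqv'
      have hmemadd : ∀ x, x ∈ PySem.Set.add vis nb ↔ x ∈ vis ∨ x = nb := by
        intro x; exact PySem.Set.mem_add vis nb x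
      refine ⟨fun x => ?_, hb, hc, ⟨nb :: new, by rw [hnew]; simp, ?_⟩, hd, fun x hx hxv => ?_, ?_⟩
      · rw [ha x, hmemadd x]
        constructor
        · rintro ((h | h) | h)
          · exact Or.inl h
          · exact Or.inr (h ▸ List.mem_cons_self)
          · exact Or.inr (List.mem_cons_of_mem _ h)
        · rintro (h | h)
          · exact Or.inl (Or.inl h)
          · rcases List.mem_cons.1 h with rfl | h
            · exact Or.inl (Or.inr rfl)
            · exact Or.inr h
      · intro x hx
        rcases List.mem_cons.1 hx with rfl | hx
        · exact ⟨List.mem_cons_self, hnb⟩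
        · obtain ⟨h1, h2⟩ := hnewp x hx
          exact ⟨List.mem_cons_of_mem _ h1, fun hv => h2 ((hmemadd x).2 (Or.inl hv))⟩
      · rcases List.mem_cons.1 hx with rfl | hx
        · rw [hnew]
          exact List.mem_append_left _ (List.mem_append_right _ List.mem_cons_self)
        · by_cases hv' : x ∈ PySem.Set.add vis nb
          · rcases (hmemadd x).1 hv' with h | rfl
            · exact absurd h hxv
            · rw [hnew]
              exact List.mem_append_left _ (List.mem_append_right _ List.mem_cons_self)
          · exact hf x hx hv'
      · -- the measure
        have hnbA : nb ∈ active.toFinset := List.mem_toFinset.2 (hmem nb List.mem_cons_self)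
        have htf : (PySem.Set.add vis nb).toFinset = insert nb vis.toFinset := by
          rw [hadd]; ext z; simp
        have hnbin : nb ∈ active.toFinset \ vis.toFinset :=
          Finset.mem_sdiff.2 ⟨hnbA, fun hx => hnb (List.mem_toFinset.1 hx)⟩
        have hcard : (active.toFinset \ (PySem.Set.add vis nb).toFinset).card
            = (active.toFinset \ vis.toFinset).card - 1 := by
          rw [htf, Finset.sdiff_insert, Finset.card_erase_of_mem hnbin]
        have hpos : 1 ≤ (active.toFinset \ vis.toFinset).card :=
          Finset.card_pos.2 ⟨nb, hnbin⟩
        have := he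
        rw [hcard] at this
        simp only [List.length_append, List.length_singleton] at this
        omega

theorem aBfs_spec {adj : List (Int × List Int)} (hk : (adj.map (·.1)).Nodup)
    (active : List Int)
    (hsub : ∀ u v, eRel adj u v → v ∈ active) :
    ∀ (fuel : Nat) (vis q : List Int), vis.Nodup → q.Nodup →
      (∀ x ∈ q, x ∈ vis) →
      (∀ x ∈ vis, x ∉ q → ∀ y, eRel adj x y → y ∈ vis) →
      2 * ((active.toFinset \ vis.toFinset).card) + q.length ≤ fuel →
      ((∀ z, z ∈ aBfs adj fuel vis q ↔ z ∈ vis ∨ ∃ s ∈ q, KRel adj s z) ∧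
        (aBfs adj fuel vis q).Nodup) := by
  intro fuel
  induction fuel with
  | zero =>
    intro vis q hvis hq hqv _ hfb
    have hq0 : q = [] := List.eq_nil_of_length_eq_zero (by omega)
    subst hq0
    exact ⟨fun z => by simp [aBfs], hvis⟩
  | succ fuel ih =>
    intro vis q hvis hq hqv hcl hfb
    cases q with
    | nil => exact ⟨fun z => by simp [aBfs], hvis⟩
    | cons node rest =>
      have hred : aBfs adj (fuel + 1) vis (node :: rest) =
          aBfs adj fuel
            (((PySem.Dict.mk adj).getD node []).foldl
              (fun (st : PySem.Set Int × List Int) nb =>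
                if nb ∈ st.1 then st else (PySem.Set.add st.1 nb, st.2 ++ [nb])) (vis, rest)).1
            (((PySem.Dict.mk adj).getD node []).foldl
              (fun (st : PySem.Set Int × List Int) nb =>
                if nb ∈ st.1 then st else (PySem.Set.add st.1 nb, st.2 ++ [nb])) (vis, rest)).2 := rfl
      have hns : ∀ x ∈ (PySem.Dict.mk adj).getD node [], x ∈ active :=
        fun x hx => hsub node x ((getD_mk_adj hk node x).1 hx)
      simp only [List.nodup_cons] at hq
      obtain ⟨ha, hnd1, hnd2, ⟨new, hnew, hnewp⟩, hd1, hf1, he1⟩ :=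
        bfs_inner active ((PySem.Dict.mk adj).getD node []) hns vis rest hvis hq.2
          (fun x hx => hqv x (List.mem_cons_of_mem _ hx))
      have hclosed' : ∀ x ∈ (((PySem.Dict.mk adj).getD node []).foldl
            (fun (st : PySem.Set Int × List Int) nb =>
              if nb ∈ st.1 then st else (PySem.Set.add st.1 nb, st.2 ++ [nb])) (vis, rest)).1,
          x ∉ (((PySem.Dict.mk adj).getD node []).foldl
            (fun (st : PySem.Set Int × List Int) nb =>
              if nb ∈ st.1 then st else (PySem.Set.add st.1 nb, st.2 ++ [nb])) (vis, rest)).2 →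
          ∀ y, eRel adj x y → y ∈ (((PySem.Dict.mk adj).getD node []).foldl
            (fun (st : PySem.Set Int × List Int) nb =>
              if nb ∈ st.1 then st else (PySem.Set.add st.1 nb, st.2 ++ [nb])) (vis, rest)).1 := by
        intro x hx hnx y hexy
        by_cases hxn : x = node
        · subst hxn
          exact (ha y).2 (Or.inr ((getD_mk_adj hk x y).2 hexy))
        · by_cases hxv : x ∈ vis
          · have hxq : x ∉ node :: rest := by
              intro hmem
              rcases List.mem_cons.1 hmem with h | h
              · exact hxn h
              · exact hnx (hnew ▸ List.mem_append_left _ h)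
            exact (ha y).2 (Or.inl (hcl x hxv hxq y hexy))
          · rcases (ha x).1 hx with h | h
            · exact absurd h hxv
            · exact absurd (hf1 x h hxv) hnx
      obtain ⟨ihiff, ihnd⟩ := ih _ _ hnd1 hnd2 hd1 hclosed'
        (by simp only [List.length_cons] at hfb; omega)
      rw [hred]
      refine ⟨fun z => ?_, ihnd⟩
      rw [ihiff z]
      constructor
      · rintro (hz | ⟨s, hs, hks⟩)
        · rcases (ha z).1 hz with h | h
          · exact Or.inl h
          · exact Or.inr ⟨node, List.mem_cons_self,
              Relation.ReflTransGen.single ((getD_mk_adj hk node z).1 h)⟩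
        · rw [hnew] at hs
          rcases List.mem_append.1 hs with h | h
          · exact Or.inr ⟨s, List.mem_cons_of_mem _ h, hks⟩
          · exact Or.inr ⟨node, List.mem_cons_self,
              Relation.ReflTransGen.trans
                (Relation.ReflTransGen.single ((getD_mk_adj hk node s).1 (hnewp s h).1)) hks⟩
      · rintro (hz | ⟨s, hs, hks⟩)
        · exact Or.inl ((ha z).2 (Or.inl hz))
        · rcases List.mem_cons.1 hs with rfl | hsr
          · have hnodein : s ∈ (((PySem.Dict.mk adj).getD s []).foldl
                (fun (st : PySem.Set Int × List Int) nb =>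
                  if nb ∈ st.1 then st else (PySem.Set.add st.1 nb, st.2 ++ [nb])) (vis, rest)).1 :=
              (ha s).2 (Or.inl (hqv s List.mem_cons_self))
            rcases reach_split hclosed' hks hnodein with h | h
            · exact Or.inl h
            · exact Or.inr h
          · exact Or.inr ⟨s, hnew ▸ List.mem_append_left _ hsr, hks⟩

-- ---- reachability with constrained intermediate vertices (for Warshall's invariant) ----

-- Walk e u l v: an e-path u -> v whose intermediate vertices are exactly the list l
def Walk (e : Int → Int → Prop) : Int → List Int → Int → Prop
  | u, [], v => e u v
  | u, x :: t, v => e u x ∧ Walk e x t v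

theorem walk_append (e : Int → Int → Prop) (k v : Int) :
    ∀ (l1 : List Int) (u : Int) (l2 : List Int),
      Walk e u (l1 ++ k :: l2) v ↔ (Walk e u l1 k ∧ Walk e k l2 v) := by
  intro l1
  induction l1 with
  | nil => intro u l2; exact Iff.rfl
  | cons x t ih =>
    intro u l2
    show (e u x ∧ Walk e x (t ++ k :: l2) v) ↔ ((e u x ∧ Walk e x t k) ∧ _)
    rw [ih x l2, and_assoc]

def Via (adj : List (Int × List Int)) (A : List Int) (u v : Int) : Prop :=
  u = v ∨ ∃ l : List Int, (∀ x ∈ l, x ∈ A) ∧ Walk (eRel adj) u l v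

theorem via_refl {adj : List (Int × List Int)} {A : List Int} (u : Int) : Via adj A u u :=
  Or.inl rfl

theorem via_single {adj : List (Int × List Int)} {A : List Int} {u v : Int}
    (h : eRel adj u v) : Via adj A u v :=
  Or.inr ⟨[], by simp, h⟩

theorem via_nil {adj : List (Int × List Int)} {u v : Int} :
    Via adj [] u v ↔ u = v ∨ eRel adj u v := by
  constructor
  · rintro (rfl | ⟨l, hl, hw⟩)
    · exact Or.inl rfl
    · cases l with
      | nil => exact Or.inr hw
      | cons x t => exact absurd (hl x List.mem_cons_self) (List.not_mem_nil)
  · rintro (rfl | h)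
    · exact via_refl _
    · exact via_single h

theorem via_mono {adj : List (Int × List Int)} {A B : List Int} (hAB : ∀ x ∈ A, x ∈ B)
    {u v : Int} : Via adj A u v → Via adj B u v := by
  rintro (rfl | ⟨l, hl, hw⟩)
  · exact via_refl _
  · exact Or.inr ⟨l, fun x hx => hAB x (hl x hx), hw⟩

theorem via_congr {adj : List (Int × List Int)} {A B : List Int} (h : ∀ x, x ∈ A ↔ x ∈ B)
    {u v : Int} : Via adj A u v ↔ Via adj B u v :=
  ⟨via_mono (fun x hx => (h x).1 hx), via_mono (fun x hx => (h x).2 hx)⟩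

theorem via_join {adj : List (Int × List Int)} {A : List Int} {u k v : Int} (hk : k ∈ A)
    (h1 : Via adj A u k) (h2 : Via adj A k v) : Via adj A u v := by
  rcases h1 with rfl | ⟨l1, hl1, hw1⟩
  · exact h2
  · rcases h2 with rfl | ⟨l2, hl2, hw2⟩
    · exact Or.inr ⟨l1, hl1, hw1⟩
    · refine Or.inr ⟨l1 ++ k :: l2, ?_, (walk_append _ k v l1 u l2).2 ⟨hw1, hw2⟩⟩
      intro x hx
      rcases List.mem_append.1 hx with h | h
      · exact hl1 x h
      · rcases List.mem_cons.1 h with rfl | h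
        · exact hk
        · exact hl2 x h

theorem via_pivot_aux {adj : List (Int × List Int)} {k : Int} {A : List Int} :
    ∀ (n : Nat) (l : List Int) (u v : Int), l.length ≤ n → (∀ x ∈ l, x ∈ k :: A) →
      Walk (eRel adj) u l v →
      (Via adj A u v ∨ (Via adj A u k ∧ Via adj A k v)) := by
  intro n
  induction n with
  | zero =>
    intro l u v hlen hl hw
    have : l = [] := List.eq_nil_of_length_eq_zero (by omega)
    subst this
    exact Or.inl (via_single hw)
  | succ n ih =>
    intro l u v hlen hl hw
    by_cases hkl : k ∈ l
    · obtain ⟨l1, l2, rfl⟩ := List.append_of_mem hkl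
      obtain ⟨hw1, hw2⟩ := (walk_append _ k v l1 u l2).1 hw
      simp only [List.length_append, List.length_cons] at hlen
      have h1 : Via adj A u k ∨ (Via adj A u k ∧ Via adj A k k) :=
        ih l1 u k (by omega) (fun x hx => hl x (by simp [hx])) hw1
      have h2 : Via adj A k v ∨ (Via adj A k k ∧ Via adj A k v) :=
        ih l2 k v (by omega) (fun x hx => hl x (by simp [hx])) hw2
      refine Or.inr ⟨?_, ?_⟩
      · rcases h1 with h | ⟨h, _⟩ <;> exact h
      · rcases h2 with h | ⟨_, h⟩ <;> exact h
    · refine Or.inl (Or.inr ⟨l, fun x hx => ?_, hw⟩)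
      rcases List.mem_cons.1 (hl x hx) with rfl | h
      · exact absurd hx hkl
      · exact h

theorem via_pivot {adj : List (Int × List Int)} {k : Int} {A : List Int} {u v : Int} :
    Via adj (k :: A) u v ↔ (Via adj A u v ∨ (Via adj A u k ∧ Via adj A k v)) := by
  constructor
  · rintro (rfl | ⟨l, hl, hw⟩)
    · exact Or.inl (via_refl _)
    · exact via_pivot_aux l.length l u v le_rfl hl hw
  · rintro (h | ⟨h1, h2⟩)
    · exact via_mono (fun x hx => List.mem_cons_of_mem _ hx) h
    · exact via_join List.mem_cons_self
        (via_mono (fun x hx => List.mem_cons_of_mem _ hx) h1)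
        (via_mono (fun x hx => List.mem_cons_of_mem _ hx) h2)

-- adding a pivot as allowed intermediate changes nothing when it is an endpoint
theorem via_pivot_endpoint_left {adj : List (Int × List Int)} {k : Int} {A : List Int} {t : Int} :
    Via adj (k :: A) k t ↔ Via adj A k t := by
  rw [via_pivot]
  constructor
  · rintro (h | ⟨_, h⟩) <;> exact h
  · exact Or.inl

theorem via_all {adj : List (Int × List Int)} {L : List Int}
    (hends : ∀ x y, eRel adj x y → x ∈ L ∧ y ∈ L) {u v : Int} :
    Via adj L u v ↔ KRel adj u v := by
  constructor
  · rintro (rfl | ⟨l, hmem, hw⟩)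
    · exact Relation.ReflTransGen.refl
    · clear hends hmem
      induction l generalizing u with
      | nil => exact Relation.ReflTransGen.single hw
      | cons x t iht => exact Relation.ReflTransGen.head hw.1 (iht hw.2)
  · intro h
    induction h with
    | refl => exact via_refl _
    | tail hum hmv ih =>
      rename_i m v'
      exact via_join (hends m v' hmv).1 ih (via_single hmv)

-- ---- the base reachability dictionary ----

theorem bBase_getD {adj : List (Int × List Int)} (hk : (adj.map (·.1)).Nodup)
    (L : List Int) (hLnd : L.Nodup) :
    ∀ s ∈ L, ∀ t, t ∈ (bBase adj L).getD s [] ↔ (t ∈ L ∧ Via adj [] s t) := by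
  have hitems := PySem.Dict.items_foldl_insert_fresh (ν := PySem.Set Int) L (fun x => x)
    (fun s => PySem.Set.ofList (L.filter
      (fun t => s == t || decide (t ∈ (PySem.Dict.mk adj).getD s [])))) PySem.Dict.empty
    (fun a _ => by simp) (by simpa using hLnd)
  simp only [show (PySem.Dict.empty : PySem.Dict Int (PySem.Set Int)).items = [] from rfl,
    List.nil_append] at hitems
  have hkeys : (bBase adj L).keys = L := by
    show ((bBase adj L).items.map (·.1)) = L
    rw [show (bBase adj L).items = _ from hitems, List.map_map]
    exact List.map_congr_left (fun v _ => rfl) |>.trans (List.map_id _)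
  intro s hs t
  have hknd : (bBase adj L).keys.Nodup := by rw [hkeys]; exact hLnd
  have hmemit : (s, PySem.Set.ofList (L.filter
      (fun t => s == t || decide (t ∈ (PySem.Dict.mk adj).getD s [])))) ∈ (bBase adj L).items := by
    rw [show (bBase adj L).items = _ from hitems]
    exact List.mem_map.2 ⟨s, hs, rfl⟩
  have hgd : (bBase adj L).getD s [] = PySem.Set.ofList (L.filter
      (fun t => s == t || decide (t ∈ (PySem.Dict.mk adj).getD s []))) :=
    PySem.Dict.getD_of_mem_items _ hmemit hknd _
  rw [hgd, PySem.Set.mem_ofList, List.mem_filter]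
  rw [via_nil]
  constructor
  · rintro ⟨h1, h2⟩
    refine ⟨h1, ?_⟩
    rcases Bool.or_eq_true_iff.1 h2 with h | h
    · exact Or.inl (by simpa using h)
    · exact Or.inr ((getD_mk_adj hk s t).1 (of_decide_eq_true h))
  · rintro ⟨h1, h2⟩
    refine ⟨h1, Bool.or_eq_true_iff.2 ?_⟩
    rcases h2 with rfl | h
    · exact Or.inl (by simp)
    · exact Or.inr (decide_eq_true ((getD_mk_adj hk s t).2 h))

-- ---- one Warshall pivot round, rows updated in place ----

theorem fw_row {adj : List (Int × List Int)} {L : List Int} (k : Int) (piv : List Int)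
    (hkL : k ∈ L) :
    ∀ (is : List Int) (d : PySem.Dict Int (PySem.Set Int)), is.Nodup →
      (∀ t, t ∈ d.getD k [] ↔ (t ∈ L ∧ Via adj piv k t)) →
      (∀ i ∈ is, ∀ t, t ∈ d.getD i [] ↔ (t ∈ L ∧ Via adj piv i t)) →
      (∀ i ∈ is, ∀ t, t ∈ (is.foldl (fun d i =>
          if decide (k ∈ d.getD i []) then
            d.insert i (PySem.Set.union (d.getD i []) (d.getD k []))
          else d) d).getD i [] ↔ (t ∈ L ∧ Via adj (k :: piv) i t)) ∧
      (∀ x, x ∉ is → (is.foldl (fun d i =>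
          if decide (k ∈ d.getD i []) then
            d.insert i (PySem.Set.union (d.getD i []) (d.getD k []))
          else d) d).getD x [] = d.getD x []) := by
  intro is
  induction is with
  | nil => intro d _ _ _; exact ⟨by simp, fun x _ => rfl⟩
  | cons i0 rest ih =>
    intro d hnd hrowk hrows
    simp only [List.nodup_cons] at hnd
    simp only [List.foldl_cons]
    have hrow0 := hrows i0 List.mem_cons_self
    by_cases hc : k ∈ d.getD i0 []
    · have hik : Via adj piv i0 k := ((hrow0 k).1 hc).2
      rw [if_pos (decide_eq_true hc)]
      have hnew : ∀ t, t ∈ (d.insert i0 (PySem.Set.union (d.getD i0 []) (d.getD k []))).getD i0 []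
          ↔ (t ∈ L ∧ Via adj (k :: piv) i0 t) := by
        intro t
        rw [PySem.Dict.getD_insert_self, PySem.Set.mem_union, hrow0 t, hrowk t, via_pivot]
        constructor
        · rintro (⟨h1, h2⟩ | ⟨h1, h2⟩)
          · exact ⟨h1, Or.inl h2⟩
          · exact ⟨h1, Or.inr ⟨hik, h2⟩⟩
        · rintro ⟨h1, (h2 | ⟨_, h2⟩)⟩
          · exact Or.inl ⟨h1, h2⟩
          · exact Or.inr ⟨h1, h2⟩
      have hother : ∀ x, x ≠ i0 →
          (d.insert i0 (PySem.Set.union (d.getD i0 []) (d.getD k []))).getD x [] = d.getD x [] := by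
        intro x hx
        rw [PySem.Dict.getD_insert]
        exact if_neg hx
      have hrowk' : ∀ t, t ∈ (d.insert i0 (PySem.Set.union (d.getD i0 []) (d.getD k []))).getD k []
          ↔ (t ∈ L ∧ Via adj piv k t) := by
        intro t
        by_cases hki : k = i0
        · subst hki
          rw [hnew t, via_pivot_endpoint_left]
        · rw [hother k hki, hrowk t]
      obtain ⟨ihA, ihB⟩ := ih _ hnd.2 hrowk'
        (fun i hi t => by rw [hother i (fun he => hnd.1 (he ▸ hi)), hrows i (List.mem_cons_of_mem _ hi)])
      refine ⟨?_, ?_⟩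
      · intro i hi t
        rcases List.mem_cons.1 hi with rfl | hi
        · rw [ihB i hnd.1, hnew t]
        · exact ihA i hi t
      · intro x hx
        rw [ihB x (fun h => hx (List.mem_cons_of_mem _ h)),
          hother x (fun he => hx (he ▸ List.mem_cons_self))]
    · have hik : ¬ Via adj piv i0 k := fun h => hc ((hrow0 k).2 ⟨hkL, h⟩)
      rw [if_neg (by simpa using hc)]
      obtain ⟨ihA, ihB⟩ := ih _ hnd.2 hrowk
        (fun i hi t => hrows i (List.mem_cons_of_mem _ hi) t)
      refine ⟨?_, fun x hx => ihB x (fun h => hx (List.mem_cons_of_mem _ h))⟩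
      · intro i hi t
        rcases List.mem_cons.1 hi with rfl | hi
        · rw [ihB i hnd.1, hrow0 t, via_pivot]
          constructor
          · rintro ⟨h1, h2⟩; exact ⟨h1, Or.inl h2⟩
          · rintro ⟨h1, (h2 | ⟨h2, _⟩)⟩
            · exact ⟨h1, h2⟩
            · exact absurd h2 hik
        · exact ihA i hi t

-- ---- the pivot loop ----

theorem fw_loop {adj : List (Int × List Int)} {L : List Int} (hLnd : L.Nodup) :
    ∀ (ks : List Int) (piv : List Int) (d : PySem.Dict Int (PySem.Set Int)),
      (∀ x ∈ ks, x ∈ L) →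
      (∀ i ∈ L, ∀ t, t ∈ d.getD i [] ↔ (t ∈ L ∧ Via adj piv i t)) →
      (∀ i ∈ L, ∀ t, t ∈ (ks.foldl (fun d k =>
          L.foldl (fun d i =>
            if decide (k ∈ d.getD i []) then
              d.insert i (PySem.Set.union (d.getD i []) (d.getD k []))
            else d) d) d).getD i [] ↔ (t ∈ L ∧ Via adj (ks.reverse ++ piv) i t)) := by
  intro ks
  induction ks with
  | nil => intro piv d _ h; simpa using h
  | cons k kt ih =>
    intro piv d hks hinv
    simp only [List.foldl_cons]
    have hkL := hks k List.mem_cons_self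
    obtain ⟨hA, _⟩ := fw_row k piv hkL L d hLnd (hinv k hkL) hinv
    have := ih (k :: piv) _ (fun x hx => hks x (List.mem_cons_of_mem _ hx)) hA
    intro i hi t
    rw [this i hi t]
    apply and_congr_right'
    apply via_congr
    intro x
    simp [or_assoc, or_comm (a := x = k)]

-- ---- count equivalence: A's BFS loop and B's no-earlier-start-reaches-it count ----

theorem count_eq {adj : List (Int × List Int)} (hk : (adj.map (·.1)).Nodup)
    (active : List Int) (hact : active.Nodup)
    (hsub : ∀ u v, eRel adj u v → v ∈ active)
    (reachD : PySem.Dict Int (PySem.Set Int))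
    (hreach : ∀ s t, s ∈ active → t ∈ active → (t ∈ reachD.getD s [] ↔ KRel adj s t)) :
    ∀ (Lr P vis : List Int) (C : Int), (∀ x ∈ Lr, x ∈ active) → (∀ x ∈ P, x ∈ active) →
      vis.Nodup →
      (∀ z, z ∈ vis ↔ ∃ u ∈ P, KRel adj u z) →
      (Lr.foldl (fun (st : PySem.Set Int × Int) start =>
          if start ∈ st.1 then st
          else (aBfs adj (2 * active.length + 1) (PySem.Set.add st.1 start) [start], st.2 + 1))
        (vis, C)).2
      = (Lr.foldl (fun (st : List Int × Int) s =>
          (st.1 ++ [s], if st.1.any (fun t => decide (s ∈ reachD.getD t [])) then st.2 else st.2 + 1))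
        (P, C)).2 := by
  intro Lr
  induction Lr with
  | nil => intro P vis C _ _ _ _; rfl
  | cons s t ih =>
    intro P vis C hL hP hvis hchar
    have hsact : s ∈ active := hL s List.mem_cons_self
    simp only [List.foldl_cons]
    have hcond : s ∈ vis ↔ (P.any (fun t => decide (s ∈ reachD.getD t [])) = true) := by
      rw [hchar s, List.any_eq_true]
      constructor
      · rintro ⟨u, hu, hK⟩
        exact ⟨u, hu, decide_eq_true ((hreach u s (hP u hu) hsact).2 hK)⟩
      · rintro ⟨u, hu, hd⟩
        exact ⟨u, hu, (hreach u s (hP u hu) hsact).1 (of_decide_eq_true hd)⟩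
    by_cases hsv : s ∈ vis
    · rw [if_pos hsv, if_pos (hcond.1 hsv)]
      obtain ⟨u0, hu0, hK0⟩ := (hchar s).1 hsv
      refine ih (P ++ [s]) vis C (fun x hx => hL x (List.mem_cons_of_mem _ hx))
        (fun x hx => ?_) hvis (fun z => ?_)
      · rcases List.mem_append.1 hx with h | h
        · exact hP x h
        · rcases List.mem_singleton.1 h with rfl; exact hsact
      · rw [hchar z]
        constructor
        · rintro ⟨u, hu, hK⟩; exact ⟨u, List.mem_append_left _ hu, hK⟩
        · rintro ⟨u, hu, hK⟩
          rcases List.mem_append.1 hu with hu | hu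
          · exact ⟨u, hu, hK⟩
          · rcases List.mem_singleton.1 hu with rfl
            exact ⟨u0, hu0, Relation.ReflTransGen.trans hK0 hK⟩
    · rw [if_neg hsv, if_neg (fun h => hsv (hcond.2 h))]
      have hvis1 : (PySem.Set.add vis s).Nodup := PySem.Set.nodup_add _ _ hvis
      have hclosed : ∀ x ∈ PySem.Set.add vis s, x ∉ [s] → ∀ y, eRel adj x y →
          y ∈ PySem.Set.add vis s := by
        intro x hx hnx y hexy
        rcases (PySem.Set.mem_add vis s x).1 hx with hxv | rfl
        · obtain ⟨u, hu, hK⟩ := (hchar x).1 hxv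
          exact (PySem.Set.mem_add vis s y).2
            (Or.inl ((hchar y).2 ⟨u, hu, hK.tail hexy⟩))
        · exact absurd (List.mem_singleton_self _) hnx
      have hfuel : 2 * ((active.toFinset \ (PySem.Set.add vis s).toFinset).card)
          + [s].length ≤ 2 * active.length + 1 := by
        have h1 : (active.toFinset \ (PySem.Set.add vis s).toFinset).card ≤ active.toFinset.card :=
          Finset.card_le_card (Finset.sdiff_subset)
        have h2 : active.toFinset.card = active.length := List.toFinset_card_of_nodup hact
        simp only [List.length_singleton]
        omega
      obtain ⟨hiff, hnd⟩ := aBfs_spec hk active hsub (2 * active.length + 1)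
        (PySem.Set.add vis s) [s] hvis1 (List.nodup_singleton _)
        (fun x hx => (List.mem_singleton.1 hx) ▸ (PySem.Set.mem_add vis s s).2 (Or.inr rfl))
        hclosed hfuel
      refine ih (P ++ [s]) _ (C + 1) (fun x hx => hL x (List.mem_cons_of_mem _ hx))
        (fun x hx => ?_) hnd (fun z => ?_)
      · rcases List.mem_append.1 hx with h | h
        · exact hP x h
        · rcases List.mem_singleton.1 h with rfl; exact hsact
      · rw [hiff z]
        constructor
        · rintro (hz | ⟨s', hs', hK⟩)
          · rcases (PySem.Set.mem_add vis s z).1 hz with hzv | hzs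
            · obtain ⟨u, hu, hK⟩ := (hchar z).1 hzv
              exact ⟨u, List.mem_append_left _ hu, hK⟩
            · exact ⟨s, List.mem_append_right _ (List.mem_singleton_self _),
                by rw [hzs]; exact Relation.ReflTransGen.refl⟩
          · rw [List.mem_singleton.1 hs'] at hK
            exact ⟨s, List.mem_append_right _ (List.mem_singleton_self _), hK⟩
        · rintro ⟨u, hu, hK⟩
          rcases List.mem_append.1 hu with hu | hu
          · exact Or.inl ((PySem.Set.mem_add vis s z).2
              (Or.inl ((hchar z).2 ⟨u, hu, hK⟩)))
          · rw [List.mem_singleton.1 hu] at hK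
            exact Or.inr ⟨s, List.mem_singleton_self _, hK⟩

-- ---- assembly ----

theorem empty_case (N : Int) (hN : 0 ≤ N) : compute_beta1 [] N = compute_beta1_alt [] N := by
  have hstep : ∀ (L vis : List Int) (C : Int), L.Nodup → (∀ x ∈ L, x ∉ vis) →
      (L.foldl (fun (st : PySem.Set Int × Int) start =>
        if start ∈ st.1 then st
        else (aBfs [] 1 (PySem.Set.add st.1 start) [start], st.2 + 1)) (vis, C)).2
      = C + L.length := by
    intro L
    induction L with
    | nil => intro vis C _ _; simp
    | cons s t ih =>
      intro vis C hnd hdis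
      simp only [List.nodup_cons] at hnd
      simp only [List.foldl_cons, if_neg (hdis s List.mem_cons_self)]
      have hbfs : aBfs [] 1 (PySem.Set.add vis s) [s] = PySem.Set.add vis s := rfl
      rw [hbfs]
      have := ih (PySem.Set.add vis s) (C + 1) hnd.2 (fun x hx hmem => by
        rcases (PySem.Set.mem_add vis s x).1 hmem with h | rfl
        · exact hdis x (List.mem_cons_of_mem _ hx) h
        · exact hnd.1 hx)
      rw [this]
      simp only [List.length_cons]
      push_cast
      ring
  unfold compute_beta1 compute_beta1_alt
  simp only [aCollect, bCollect, List.foldl_nil]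
  have hempty : (PySem.Set.empty : PySem.Set Int) = [] := rfl
  simp only [hempty, ne_eq, not_true_eq_false, if_false, if_true, List.length_nil]
  rw [hstep (pySetOrderInt (PySem.List.pyRange 0 N 1)) [] 0 (pySetOrderInt_nodup _)
    (fun x _ h => (List.not_mem_nil h))]
  have hplen : ((pySetOrderInt (PySem.List.pyRange 0 N 1)).length : Int)
      = ((PySem.List.pyRange 0 N 1).length : Int) := by
    have hperm : (pySetOrderInt (PySem.List.pyRange 0 N 1)).Perm (PySem.List.pyRange 0 N 1) :=
      (List.perm_ext_iff_of_nodup (pySetOrderInt_nodup _) (PySem.List.nodup_pyRange_one 0 N)).2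
        (fun x => mem_pySetOrderInt _ x)
    rw [hperm.length_eq]
  rw [hplen, PySem.List.length_pyRange_one]
  have h1 : (((N - 0).toNat : Nat) : Int) = max (N - 0) 0 := Int.ofNat_toNat _
  rw [h1]
  have hlen : (PySem.Set.empty : PySem.Set (Int × Int)).len = 0 := rfl
  rw [hlen]
  omega

theorem main_case {adj : List (Int × List Int)} {N : Int} (hadj : adj ≠ [])
    (hk : (adj.map (·.1)).Nodup) : compute_beta1 adj N = compute_beta1_alt adj N := by
  have hactnd := nodup_aCollect_active adj
  have hamem := mem_aCollect_active adj
  have hce := collect_eq_fold adj (PySem.Set.empty, PySem.Set.empty)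
  have hA1 : (aCollect adj).1 = (bCollect adj).2 := by
    rw [aCollect, bCollect]; rw [show (PySem.Set.empty : PySem.Set Int) = [] from rfl] at hce ⊢
    rw [hce]
  have hA2 : (aCollect adj).2 = (bCollect adj).1 := by
    rw [aCollect, bCollect]; rw [show (PySem.Set.empty : PySem.Set Int) = [] from rfl] at hce ⊢
    rw [hce]
  have hx : ∃ x, occurs adj x := by
    cases adj with
    | nil => exact absurd rfl hadj
    | cons p t => exact ⟨p.1, p, List.mem_cons_self, Or.inl rfl⟩
  obtain ⟨x0, hx0⟩ := hx
  have hane : (aCollect adj).2 ≠ [] := by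
    intro h
    have := (hamem x0).2 hx0
    rw [h] at this
    exact List.not_mem_nil this
  have hnne : ¬ ((bCollect adj).1 = []) := by rw [← hA2]; exact hane
  have hsub : ∀ u v, eRel adj u v → v ∈ (aCollect adj).2 :=
    fun u v h => (hamem v).2 (eRel_occurs h).2
  -- the iteration order of the set of active nodes, and its properties
  have hLnd : (pySetOrderInt ((aCollect adj).2)).Nodup := pySetOrderInt_nodup _
  have hLmem : ∀ x, x ∈ pySetOrderInt ((aCollect adj).2) ↔ occurs adj x := by
    intro x; rw [mem_pySetOrderInt, hamem]
  have hends : ∀ x y, eRel adj x y →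
      x ∈ pySetOrderInt ((aCollect adj).2) ∧ y ∈ pySetOrderInt ((aCollect adj).2) := by
    intro x y h
    exact ⟨(hLmem x).2 (eRel_occurs h).1, (hLmem y).2 (eRel_occurs h).2⟩
  -- Warshall closure is exact reachability on the active nodes
  have hbase := bBase_getD hk (pySetOrderInt ((aCollect adj).2)) hLnd
  have hfw := fw_loop (adj := adj) hLnd (pySetOrderInt ((aCollect adj).2)) []
    (bBase adj (pySetOrderInt ((aCollect adj).2))) (fun x hx => hx) hbase
  have hreach : ∀ s t, s ∈ (aCollect adj).2 → t ∈ (aCollect adj).2 →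
      (t ∈ (bFw (pySetOrderInt ((aCollect adj).2))
        (bBase adj (pySetOrderInt ((aCollect adj).2)))).getD s [] ↔ KRel adj s t) := by
    intro s t hs ht
    have hsL : s ∈ pySetOrderInt ((aCollect adj).2) := (mem_pySetOrderInt _ s).2 hs
    have htL : t ∈ pySetOrderInt ((aCollect adj).2) := (mem_pySetOrderInt _ t).2 ht
    rw [bFw, hfw s hsL t]
    constructor
    · rintro ⟨_, hvia⟩
      rw [← via_all hends]
      refine via_mono (fun x hx => ?_) hvia
      rcases List.mem_append.1 hx with h | h
      · exact List.mem_reverse.1 h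
      · exact absurd h (List.not_mem_nil)
    · intro hK
      refine ⟨htL, ?_⟩
      refine via_mono (fun x hx => List.mem_append_left _ (List.mem_reverse.2 hx)) ?_
      rw [via_all hends]
      exact hK
  have hcount := count_eq hk ((aCollect adj).2) hactnd hsub
    (bFw (pySetOrderInt ((aCollect adj).2)) (bBase adj (pySetOrderInt ((aCollect adj).2))))
    hreach (pySetOrderInt ((aCollect adj).2)) [] PySem.Set.empty 0
    (fun x hx => (mem_pySetOrderInt _ x).1 hx) (by simp)
    List.nodup_nil (fun z => by simp [PySem.Set.empty])
  unfold compute_beta1 compute_beta1_alt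
  simp only [if_pos hane, if_neg hnne, ne_eq]
  rw [← hA1, ← hA2]
  rw [hcount]
  rfl

-- ===== VERDICT (by name: the statement is the Claim_ definition above) =====
theorem compute_beta1_spec : Claim_equal_compute_beta1 := by
  intro adj N _ hpre
  obtain ⟨hN, hnd⟩ := hpre
  unfold Spec_compute_beta1
  rcases eq_or_ne adj [] with rfl | h
  · exact empty_case N (hN rfl)
  · exact main_case h hnd
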